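-- pv_equiv track=rewrite | github.com/BenSlashr/maillage-pagerank | app/models/seo_analyzer.py | _is_grammatically_valid_french
-- ===== SOURCE A (Python) =====
-- def _is_grammatically_valid_french(text: str) -> bool:
--     """Vérifie si une phrase est grammaticalement valide en français (heuristique simple)"""
--     # Liste de prépositions et articles français courants
--     french_prepositions = ['à', 'au', 'aux', 'de', 'des', 'du', 'en', 'par', 'pour', 'sur', 'avec', 'sans']
--     french_articles = ['le', 'la', 'les', 'un', 'une', 'des', 'l\'', 'l']
--
--     # Vérifier si le texte est vide
--     if not text or not isinstance(text, str):
--         return False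
--
--     words = text.lower().split()
--
--     # Texte trop court (un seul mot)
--     if len(words) < 2:
--         return False
--
--     # Vérifier les cas où des prépositions sont nécessaires
--     for i, word in enumerate(words[:-1]):
--         # Cas typiques où une préposition est attendue entre deux noms
--         if i > 0 and word not in french_prepositions and word not in french_articles:
--             next_word = words[i+1]
--             prev_word = words[i-1]
--
--             # Cas spécifiques où une préposition manque probablement
--             if all(w not in french_prepositions and w not in french_articles for w in [prev_word, word, next_word]):
--                 # Trois noms consécutifs sans préposition ni article
--                 if i > 1 and words[i-2] not in french_prepositions and words[i-2] not in french_articles: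
--                     return False
--
--     # Si on arrive ici, la phrase semble correcte
--     return True
-- ===== SOURCE B (Python) =====
-- # B: mask-free single pass with a run counter of consecutive "content" words
-- # (words that are neither a French preposition nor an article); a sentence is
-- # rejected exactly when four such words appear in a row.
-- _FRENCH_STOP = frozenset([
--     'à', 'au', 'aux', 'de', 'des', 'du', 'en', 'par', 'pour', 'sur', 'avec', 'sans',
--     'le', 'la', 'les', 'un', 'une', "l'", 'l',
-- ])
--
-- def _is_grammatically_valid_french(text: str) -> bool:
--     if not text or not isinstance(text, str):
--         return False
--     words = text.lower().split()
--     if len(words) < 2: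
--         return False
--     run = 0
--     for w in words:
--         run = 0 if w in _FRENCH_STOP else run + 1
--         if run >= 4:
--             return False
--     return True
-- ===== Notes on version B (the rewrite author's own statement) =====
-- stated objective: simpler
-- what changed: Replaces A's index-based scan over enumerate(words[:-1]) with its prev/next/i-2 lookups and nested guards by a single forward pass keeping a counter of consecutive non-preposition/non-article words, rejecting when the counter reaches 4 (one unified stop-word set, no indexing).
import Mathlib
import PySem

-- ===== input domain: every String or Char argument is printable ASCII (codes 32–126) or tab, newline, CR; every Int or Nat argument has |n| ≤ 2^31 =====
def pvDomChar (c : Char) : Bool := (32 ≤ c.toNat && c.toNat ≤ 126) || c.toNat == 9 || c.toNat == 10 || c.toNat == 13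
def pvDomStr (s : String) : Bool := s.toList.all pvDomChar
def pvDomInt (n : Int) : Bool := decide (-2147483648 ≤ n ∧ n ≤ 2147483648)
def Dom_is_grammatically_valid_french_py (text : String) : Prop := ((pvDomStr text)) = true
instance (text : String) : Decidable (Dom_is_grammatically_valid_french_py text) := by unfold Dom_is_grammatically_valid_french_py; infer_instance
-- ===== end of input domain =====

-- ===== PORT A =====
-- B replaces A's indexed scan (enumerate over words[:-1] with prev/next/i-2 lookups)
-- by a single pass counting consecutive content words; equal return value proved below.

def aPreps : List String := ["à", "au", "aux", "de", "des", "du", "en", "par", "pour", "sur", "avec", "sans"]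
def aArts : List String := ["le", "la", "les", "un", "une", "l'", "l"]

-- the for-loop of A: all indices fail to trigger the `return False`
-- (the Python indexings words[i-1], words[i+1], words[i-2] are always in range when
-- evaluated, so the total pyGetD with default "" is exact here)
def aLoop (words : List String) : Bool :=
  (PySem.List.enumerate (PySem.List.slice words none (some (-1)))).all fun iw =>
    let i := iw.1
    let word := iw.2
    !(decide (i > 0) && !(aPreps.contains word) && !(aArts.contains word) &&
      ([PySem.List.pyGetD words (i - 1) "", word, PySem.List.pyGetD words (i + 1) ""].all
        (fun w => !(aPreps.contains w) && !(aArts.contains w))) &&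
      decide (i > 1) &&
      !(aPreps.contains (PySem.List.pyGetD words (i - 2) "")) &&
      !(aArts.contains (PySem.List.pyGetD words (i - 2) "")))

def is_grammatically_valid_french_py (text : String) : Bool :=
  if text == "" then false
  else
    let words := PySem.Str.split₀ (PySem.Str.lower text)
    if words.length < 2 then false
    else aLoop words

-- ===== PORT B =====
def bStop : List String :=
  ["à", "au", "aux", "de", "des", "du", "en", "par", "pour", "sur", "avec", "sans",
   "le", "la", "les", "un", "une", "l'", "l"]

def bRun : List String → Nat → Bool
  | [], _ => true
  | w :: ws, run =>
    let run' := if bStop.contains w then 0 else run + 1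
    if 4 ≤ run' then false else bRun ws run'

def is_grammatically_valid_french_py_alt (text : String) : Bool :=
  if text == "" then false
  else
    let words := PySem.Str.split₀ (PySem.Str.lower text)
    if words.length < 2 then false
    else bRun words 0

-- ===== PRECONDITION & SPEC =====
def Spec_is_grammatically_valid_french_py (text : String) (out : Bool) : Prop := out = is_grammatically_valid_french_py_alt text
instance (text : String) (out : Bool) : Decidable (Spec_is_grammatically_valid_french_py text out) := by unfold Spec_is_grammatically_valid_french_py; infer_instance

-- ===== CLAIM (what is proved, stated in full; the proofs are below) =====
def Claim_equal_is_grammatically_valid_french_py : Prop := ∀ (text : String), Dom_is_grammatically_valid_french_py text → Spec_is_grammatically_valid_french_py text (is_grammatically_valid_french_py text)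

-- ===== LEMMAS AND PROOFS =====

-- "content" word: neither a preposition nor an article
def cw (w : String) : Bool := !(aPreps.contains w) && !(aArts.contains w)

-- no four consecutive content words anywhere
def Wc (ws : List String) : Prop :=
  ∀ j : Nat, j + 4 ≤ ws.length →
    ¬(cw (ws.getD j "") ∧ cw (ws.getD (j+1) "") ∧ cw (ws.getD (j+2) "") ∧ cw (ws.getD (j+3) ""))

-- number of leading content words
def leadc : List String → Nat
  | [] => 0
  | w :: ws => if cw w then leadc ws + 1 else 0

lemma bStop_contains (w : String) : bStop.contains w = (aPreps.contains w || aArts.contains w) := by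
  rw [Bool.eq_iff_iff]
  simp [bStop, aPreps, aArts]
  tauto

lemma leadc_le (ws : List String) : leadc ws ≤ ws.length := by
  induction ws with
  | nil => simp [leadc]
  | cons w ws ih => simp only [leadc, List.length_cons]; split <;> omega

lemma cw_of_lt_leadc (ws : List String) (j : Nat) (hj : j < leadc ws) :
    cw (ws.getD j "") = true := by
  induction ws generalizing j with
  | nil => simp [leadc] at hj
  | cons w ws ih =>
    simp only [leadc] at hj
    split at hj
    · cases j with
      | zero => simpa
      | succ j => simpa using ih j (by omega)
    · omega

lemma le_leadc (ws : List String) (k : Nat) (hk : k ≤ ws.length)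
    (h : ∀ j < k, cw (ws.getD j "") = true) : k ≤ leadc ws := by
  induction ws generalizing k with
  | nil => simp at hk; omega
  | cons w ws ih =>
    cases k with
    | zero => omega
    | succ k =>
      have hw : cw w = true := by simpa using h 0 (by omega)
      simp only [leadc, hw, if_true]
      have := ih k (by simpa using hk) (fun j hj => by simpa using h (j+1) (by omega))
      omega

lemma Wc_leadc_lt (ws : List String) (h : Wc ws) : leadc ws < 4 := by
  by_contra hge
  push Not at hge
  have hlen : 4 ≤ ws.length := le_trans hge (leadc_le ws)
  exact h 0 (by omega) ⟨cw_of_lt_leadc ws 0 (by omega), cw_of_lt_leadc ws 1 (by omega),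
    cw_of_lt_leadc ws 2 (by omega), cw_of_lt_leadc ws 3 (by omega)⟩

lemma Wc_cons_false {w : String} {ws : List String} (hw : cw w = false) :
    Wc (w :: ws) ↔ Wc ws := by
  constructor
  · intro h j hj
    have := h (j+1) (by simp; omega)
    simpa using this
  · intro h j hj
    cases j with
    | zero => simp only [List.getD_cons_zero]; rintro ⟨h0, -⟩; rw [hw] at h0; cases h0
    | succ j =>
      have := h j (by simp at hj; omega)
      simpa using this

lemma Wc_cons_true {w : String} {ws : List String} (hlead : leadc ws < 3) :
    Wc (w :: ws) ↔ Wc ws := by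
  constructor
  · intro h j hj
    have := h (j+1) (by simp; omega)
    simpa using this
  · intro h j hj
    cases j with
    | zero =>
      simp only [List.getD_cons_zero, List.getD_cons_succ]
      rintro ⟨-, h1, h2, h3⟩
      have : 3 ≤ leadc ws := le_leadc ws 3 (by simp at hj; omega)
        (fun j' hj' => by interval_cases j' <;> assumption)
      omega
    | succ j =>
      have := h j (by simp at hj; omega)
      simpa using this

lemma cw_eq_not_contains (w : String) : cw w = !(bStop.contains w) := by
  rw [bStop_contains]; simp [cw]

lemma bRun_iff (ws : List String) (run : Nat) (hr : run ≤ 3) :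
    bRun ws run = true ↔ (Wc ws ∧ run + leadc ws < 4) := by
  induction ws generalizing run with
  | nil =>
    simp only [bRun, leadc, true_iff]
    exact ⟨fun j hj => by simp at hj, by omega⟩
  | cons w ws ih =>
    cases hc : cw w with
    | false =>
      have hb : bStop.contains w = true := by
        have := cw_eq_not_contains w; rw [hc] at this; simpa using this.symm
      simp only [bRun, hb, leadc, hc, if_true, Bool.false_eq_true, if_false]
      rw [if_neg (by omega), ih 0 (by omega)]
      constructor
      · rintro ⟨hW, -⟩
        exact ⟨(Wc_cons_false hc).mpr hW, by omega⟩
      · rintro ⟨hW, -⟩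
        have hW' := (Wc_cons_false hc).mp hW
        exact ⟨hW', by have := Wc_leadc_lt ws hW'; omega⟩
    | true =>
      have hb : bStop.contains w = false := by
        have := cw_eq_not_contains w; rw [hc] at this; simpa using this.symm
      simp only [bRun, hb, leadc, hc, if_true, Bool.false_eq_true, if_false]
      by_cases h3 : run = 3
      · subst h3
        rw [if_pos (by omega)]
        constructor
        · intro h; cases h
        · rintro ⟨-, h⟩; omega
      · rw [if_neg (by omega), ih (run + 1) (by omega)]
        constructor
        · rintro ⟨hW, hl⟩
          exact ⟨(Wc_cons_true (by omega)).mpr hW, by omega⟩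
        · rintro ⟨hW, hl⟩
          exact ⟨(Wc_cons_true (by omega)).mp hW, by omega⟩

lemma aLoop_iff (ws : List String) (h2 : 2 ≤ ws.length) :
    aLoop ws = true ↔ Wc ws := by
  unfold aLoop
  rw [PySem.List.slice_to_neg_one]
  rw [List.all_eq_true]
  simp only [PySem.List.mem_enumerate_iff]
  constructor
  · intro H j hj
    have hk : j + 2 < ws.dropLast.length := by simp [List.length_dropLast]; omega
    have := H _ (⟨j+2, hk, rfl⟩)
    have e1 : (0:Int) + ((j+2 : Nat):Int) - 1 = ((j+1:Nat):Int) := by push_cast; ring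
    have e2 : (0:Int) + ((j+2 : Nat):Int) + 1 = ((j+3:Nat):Int) := by push_cast; ring
    have e3 : (0:Int) + ((j+2 : Nat):Int) - 2 = ((j:Nat):Int) := by push_cast; ring
    rw [e1, e2, e3, decide_eq_true (by omega : (0:Int) + ((j+2 : Nat):Int) > 0),
        decide_eq_true (by omega : (0:Int) + ((j+2 : Nat):Int) > 1)] at this
    simp only [PySem.List.pyGetD_natCast, List.getElem_dropLast, List.all_cons, List.all_nil] at this
    rw [List.getD_eq_getElem ws "" (by omega : j + 2 < ws.length)]
    simp only [cw, Bool.not_eq_true'] at this ⊢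
    rintro ⟨c0, c1, c2, c3⟩
    simp only [Bool.and_eq_false_iff, Bool.not_eq_false'] at this
    simp only [Bool.and_eq_true, Bool.not_eq_true'] at c0 c1 c2 c3
    simp only [List.getD] at c0 c1 c3 this
    simp at c0 c1 c2 c3 this
    tauto
  · intro hW x hx
    obtain ⟨k, hk, rfl⟩ := hx
    obtain _ | _ | k := k
    · simp
    · simp
    · have hklen : k + 4 ≤ ws.length := by simp [List.length_dropLast] at hk; omega
      have hw := hW k (by omega)
      rw [List.getD_eq_getElem ws "" (by omega : k + 2 < ws.length)] at hw
      simp only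
      rw [show (0:Int) + ((k+2 : Nat):Int) - 1 = ((k+1:Nat):Int) by push_cast; ring,
          show (0:Int) + ((k+2 : Nat):Int) + 1 = ((k+3:Nat):Int) by push_cast; ring,
          show (0:Int) + ((k+2 : Nat):Int) - 2 = ((k:Nat):Int) by push_cast; ring,
          decide_eq_true (by omega : (0:Int) + ((k+2 : Nat):Int) > 0),
          decide_eq_true (by omega : (0:Int) + ((k+2 : Nat):Int) > 1)]
      simp only [PySem.List.pyGetD_natCast, List.getElem_dropLast, List.all_cons, List.all_nil]
      simp only [cw, Bool.and_eq_true, Bool.not_eq_true'] at hw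
      simp only [List.getD] at hw ⊢
      simp at hw ⊢
      tauto

-- ===== VERDICT (by name: the statement is the Claim_ definition above) =====
theorem is_grammatically_valid_french_py_spec : Claim_equal_is_grammatically_valid_french_py := by
  intro text _
  unfold Spec_is_grammatically_valid_french_py
  unfold is_grammatically_valid_french_py is_grammatically_valid_french_py_alt
  by_cases he : text == ""
  · simp [he]
  · simp only [he, Bool.false_eq_true, if_false]
    set ws := PySem.Str.split₀ (PySem.Str.lower text) with hws
    by_cases hl : ws.length < 2
    · simp [hl]
    · simp only [hl, if_false]
      have h2 : 2 ≤ ws.length := by omega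
      have hA := aLoop_iff ws h2
      have hB := bRun_iff ws 0 (by omega)
      cases ha : aLoop ws <;> cases hb : bRun ws 0
      · rfl
      · exact absurd (hA.mpr (hB.mp hb).1) (by simp [ha])
      · have hw := hA.mp ha
        have hnb : ¬(Wc ws ∧ 0 + leadc ws < 4) := fun h => by
          rw [hB.mpr h] at hb; simp at hb
        have := Wc_leadc_lt ws hw
        exact absurd hw (fun h => hnb ⟨h, by omega⟩)
      · rfl
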